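-- pv_equiv track=rewrite | github.com/23adrian2300/WDI-AGH | Zestaw 3/Zestaw 3.py | longest_increasing_subsequence_with_equal_sum
-- ===== SOURCE A (Python) =====
-- def longest_increasing_subsequence_with_equal_sum(t):
--     n = len(t)
--     max_length = 0
--
--     for start in range(n):
--         current_sum = t[start]
--         current_length = 1
--
--         for end in range(start + 1, n):
--             if t[end] > t[end - 1]:
--                 current_length += 1
--                 current_sum += t[end]
--
--                 if current_length == current_sum:
--                     max_length = max(max_length, current_length)
--             else:
--                 break
--
--     return max_length
-- ===== SOURCE B (Python) =====
-- def longest_increasing_subsequence_with_equal_sum(t):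
--     # O(n): split into maximal strictly-increasing runs; within a run a segment
--     # [s, e) is valid iff (s - P[s]) == (e - P[e]) (P = prefix sum relative to
--     # the run start), so hash each key to its earliest position in the run.
--     n = len(t)
--     best = 0
--     i = 0
--     while i < n:
--         j = i + 1
--         while j < n and t[j] > t[j - 1]:
--             j += 1
--         # maximal run is t[i:j]
--         m = j - i
--         first = {}
--         p = 0
--         for k in range(m + 1):
--             key = k - p
--             if key in first:
--                 length = k - first[key]
--                 if length >= 2 and length > best:
--                     best = length
--             else:
--                 first[key] = k
--             if k < m:
--                 p += t[i + k]
--         i = j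
--     return best
-- ===== Notes on version B (the rewrite author's own statement) =====
-- stated objective: faster
-- what changed: A rescans from every start index (quadratic); B makes a single pass that splits the list into maximal strictly-increasing runs and, within each run, hashes the key k - prefix_sum(k) to its earliest position so every segment with sum equal to length is found from its right end in O(1).
import Mathlib
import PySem

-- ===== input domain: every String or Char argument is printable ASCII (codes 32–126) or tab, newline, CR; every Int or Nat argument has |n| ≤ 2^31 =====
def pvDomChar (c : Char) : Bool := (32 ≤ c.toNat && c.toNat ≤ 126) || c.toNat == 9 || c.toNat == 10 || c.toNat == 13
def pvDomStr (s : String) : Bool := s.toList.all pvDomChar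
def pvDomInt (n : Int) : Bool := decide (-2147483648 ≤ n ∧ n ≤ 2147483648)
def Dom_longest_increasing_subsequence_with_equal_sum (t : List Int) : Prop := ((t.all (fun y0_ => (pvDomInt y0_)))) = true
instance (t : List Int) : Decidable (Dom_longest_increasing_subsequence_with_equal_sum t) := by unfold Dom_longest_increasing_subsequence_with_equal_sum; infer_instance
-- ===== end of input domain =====

-- B replaces A's quadratic start-everywhere rescan by one pass: split the list into
-- maximal strictly-increasing runs and, inside each run, hash the key k - prefixsum(k)
-- to its earliest position, so each valid segment is found from its right end.

-- ===== PORT A =====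
-- A's inner 'for end in range(start+1, n): … else: break' loop, ported as structural
-- recursion on the count of remaining indices (fuel = n - (start+1), exact); indices are
-- provably in range (1 ≤ e < len), so List.getD is exact for Python's t[end], t[end-1]
def innerA (t : List Int) (e fuel : Nat) (clen csum maxl : Int) : Int :=
  match fuel with
  | 0 => maxl
  | f + 1 =>
      if t.getD (e - 1) 0 < t.getD e 0 then
        innerA t (e + 1) f (clen + 1) (csum + t.getD e 0)
          (if clen + 1 = csum + t.getD e 0 then max maxl (clen + 1) else maxl)
      else maxl

def longest_increasing_subsequence_with_equal_sum (t : List Int) : Int :=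
  (List.range t.length).foldl
    (fun maxl s => innerA t (s + 1) (t.length - (s + 1)) 1 (t.getD s 0) maxl) 0

-- ===== PORT B =====
-- B's 'while j < n and t[j] > t[j-1]: j += 1', ported with fuel = n - j (exact)
def runEnd (t : List Int) (fuel j : Nat) : Nat :=
  match fuel with
  | 0 => j
  | f + 1 =>
      if j < t.length ∧ t.getD (j - 1) 0 < t.getD j 0 then runEnd t f (j + 1) else j

-- body of B's 'for k in range(m+1)' loop over a run starting at i of length m:
-- dict lookup / earliest-position insert, best update, prefix-sum advance
def stepB (t : List Int) (i m : Nat) (st : PySem.Dict Int Int × Int × Int) (k : Nat) :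
    PySem.Dict Int Int × Int × Int :=
  let first := st.1
  let p := st.2.1
  let best := st.2.2
  let key : Int := (k : Int) - p
  let fb : PySem.Dict Int Int × Int :=
    match first.get? key with
    | some f => (first, if 2 ≤ (k : Int) - f ∧ best < (k : Int) - f then (k : Int) - f else best)
    | none => (first.insert key (k : Int), best)
  let p' := if k < m then p + t.getD (i + k) 0 else p
  (fb.1, p', fb.2)

-- B's 'while i < n' loop, ported with fuel = n - i (exact);
-- runEnd t (n - (i+1)) (i+1) is the end j of the maximal run starting at i
def outerB (t : List Int) (fuel i : Nat) (best : Int) : Int :=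
  match fuel with
  | 0 => best
  | f + 1 =>
      if i < t.length then
        outerB t f (runEnd t (t.length - (i + 1)) (i + 1))
          (((List.range (runEnd t (t.length - (i + 1)) (i + 1) - i + 1)).foldl
              (stepB t i (runEnd t (t.length - (i + 1)) (i + 1) - i))
              (PySem.Dict.empty, 0, best)).2.2)
      else best

def longest_increasing_subsequence_with_equal_sum_alt (t : List Int) : Int :=
  outerB t t.length 0 0

-- ===== PRECONDITION & SPEC =====
def Spec_longest_increasing_subsequence_with_equal_sum (t : List Int) (out : Int) : Prop := out = longest_increasing_subsequence_with_equal_sum_alt t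
instance (t : List Int) (out : Int) : Decidable (Spec_longest_increasing_subsequence_with_equal_sum t out) := by unfold Spec_longest_increasing_subsequence_with_equal_sum; infer_instance

-- ===== CLAIM (what is proved, stated in full; the proofs are below) =====
def Claim_equal_longest_increasing_subsequence_with_equal_sum : Prop := ∀ (t : List Int), Dom_longest_increasing_subsequence_with_equal_sum t → Spec_longest_increasing_subsequence_with_equal_sum t (longest_increasing_subsequence_with_equal_sum t)

-- ===== LEMMAS AND PROOFS =====

-- sum of t[i : i+k]
def sumSeg (t : List Int) (i k : Nat) : Int :=
  ((List.range k).map (fun j => t.getD (i + j) 0)).sum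

-- the common characterisation: t[s : s+l] is strictly increasing, l ≥ 2, and sums to l
def GoodSeg (t : List Int) (s l : Nat) : Prop :=
  2 ≤ l ∧ s + l ≤ t.length ∧
  (∀ e, s < e → e < s + l → t.getD (e - 1) 0 < t.getD e 0) ∧
  sumSeg t s l = (l : Int)

def QKey (t : List Int) (i k : Nat) : Int := (k : Int) - sumSeg t i k

theorem sumSeg_zero (t : List Int) (i : Nat) : sumSeg t i 0 = 0 := rfl

theorem sumSeg_succ (t : List Int) (i k : Nat) :
    sumSeg t i (k + 1) = sumSeg t i k + t.getD (i + k) 0 := by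
  simp [sumSeg, List.range_succ]

theorem sumSeg_split (t : List Int) (i k d : Nat) :
    sumSeg t i (k + d) = sumSeg t i k + sumSeg t (i + k) d := by
  induction d with
  | zero => simp [sumSeg_zero]
  | succ d ih =>
      rw [show k + (d + 1) = (k + d) + 1 from rfl, sumSeg_succ, ih, sumSeg_succ,
        show i + (k + d) = i + k + d from by omega]
      ring

theorem sumSeg_one (t : List Int) (i : Nat) : sumSeg t i 1 = t.getD i 0 := by
  simp [sumSeg]

-- ---- generic fold lemmas ----
theorem foldl_init_le {F : Int → Nat → Int} (hmono : ∀ a x, a ≤ F a x)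
    (L : List Nat) (init : Int) : init ≤ L.foldl F init := by
  induction L generalizing init with
  | nil => simp
  | cons x xs ih => exact le_trans (hmono init x) (ih (F init x))

theorem foldl_ge_of_mem {F : Int → Nat → Int} (hmono : ∀ a x, a ≤ F a x)
    (L : List Nat) (s : Nat) (hs : s ∈ L) (v : Int) (hv : ∀ a, v ≤ F a s)
    (init : Int) : v ≤ L.foldl F init := by
  induction L generalizing init with
  | nil => cases hs
  | cons x xs ih =>
      rcases List.mem_cons.mp hs with h | h
      · subst h; exact le_trans (hv init) (foldl_init_le hmono xs _)
      · exact ih h _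

theorem foldl_inv {F : Int → Nat → Int} {P : Int → Prop} (L : List Nat)
    (h : ∀ a x, x ∈ L → P a → P (F a x)) (init : Int) (hinit : P init) :
    P (L.foldl F init) := by
  induction L generalizing init with
  | nil => exact hinit
  | cons x xs ih =>
      exact ih (fun a y hy => h a y (List.mem_cons_of_mem _ hy)) _
        (h init x List.mem_cons_self hinit)

-- ---- A-side ----
theorem innerA_ge (t : List Int) :
    ∀ fuel e clen csum maxl, maxl ≤ innerA t e fuel clen csum maxl := by
  intro fuel
  induction fuel with
  | zero => intro e clen csum maxl; exact le_refl _
  | succ f ih =>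
      intro e clen csum maxl
      simp only [innerA]
      split
      · refine le_trans ?_ (ih _ _ _ _)
        split
        · exact le_max_left _ _
        · exact le_refl _
      · exact le_refl _

theorem innerA_reaches (t : List Int) (s l : Nat) (hg : GoodSeg t s l) :
    ∀ k c maxl, l - c ≤ k → 1 ≤ c → c < l →
      (l : Int) ≤ innerA t (s + c) (t.length - (s + c)) (c : Int) (sumSeg t s c) maxl := by
  obtain ⟨h2l, hlen, hrise, hsum⟩ := hg
  intro k
  induction k with
  | zero => intro c maxl hk h1 h2; omega
  | succ k ih =>
      intro c maxl hk h1 h2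
      have he : s + c < t.length := by omega
      have hr : t.getD (s + c - 1) 0 < t.getD (s + c) 0 :=
        hrise (s + c) (by omega) (by omega)
      rw [show t.length - (s + c) = (t.length - (s + c + 1)) + 1 from by omega]
      simp only [innerA]
      rw [if_pos hr]
      by_cases hcl : c + 1 = l
      · have hcond : (c : Int) + 1 = sumSeg t s c + t.getD (s + c) 0 := by
          rw [← sumSeg_succ, hcl, hsum]; omega
        rw [if_pos hcond]
        have hl : (l : Int) ≤ max maxl ((c : Int) + 1) :=
          le_trans (by omega) (le_max_right _ _)
        exact le_trans hl (innerA_ge t _ _ _ _ _)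
      · have ihx := ih (c + 1)
          (if (c : Int) + 1 = sumSeg t s c + t.getD (s + c) 0 then max maxl ((c : Int) + 1) else maxl)
          (by omega) (by omega) (by omega)
        rw [sumSeg_succ, show s + (c + 1) = s + c + 1 from by omega] at ihx
        push_cast at ihx
        exact ihx

theorem innerA_result (t : List Int) (s : Nat) :
    ∀ k c maxl, t.length - (s + c) ≤ k → 1 ≤ c → s + c ≤ t.length →
      (∀ e, s < e → e < s + c → t.getD (e - 1) 0 < t.getD e 0) →
      innerA t (s + c) (t.length - (s + c)) (c : Int) (sumSeg t s c) maxl = maxl ∨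
        ∃ l, GoodSeg t s l ∧
          innerA t (s + c) (t.length - (s + c)) (c : Int) (sumSeg t s c) maxl = (l : Int) := by
  intro k
  induction k with
  | zero =>
      intro c maxl hk h1 hle hrise
      rw [show t.length - (s + c) = 0 from by omega]
      left; rfl
  | succ k ih =>
      intro c maxl hk h1 hle hrise
      by_cases he : s + c < t.length
      · rw [show t.length - (s + c) = (t.length - (s + c + 1)) + 1 from by omega]
        simp only [innerA]
        by_cases hr : t.getD (s + c - 1) 0 < t.getD (s + c) 0
        · rw [if_pos hr]
          have hrise' : ∀ e, s < e → e < s + (c + 1) → t.getD (e - 1) 0 < t.getD e 0 := by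
            intro e he1 he2
            by_cases hec : e < s + c
            · exact hrise e he1 hec
            · have hee : e = s + c := by omega
              subst hee; exact hr
          by_cases hcond : (c : Int) + 1 = sumSeg t s c + t.getD (s + c) 0
          · rw [if_pos hcond]
            have ihx := ih (c + 1) (max maxl ((c : Int) + 1)) (by omega) (by omega) (by omega) hrise'
            rw [sumSeg_succ, show s + (c + 1) = s + c + 1 from by omega] at ihx
            push_cast at ihx
            rcases ihx with hh | ⟨l, hgl, hh⟩
            · rcases max_choice maxl ((c : Int) + 1) with hmax | hmax
              · left; rw [hh, hmax]
              · right
                refine ⟨c + 1, ⟨by omega, by omega, hrise', ?_⟩, ?_⟩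
                · rw [sumSeg_succ, ← hcond]; push_cast; ring
                · rw [hh, hmax]; push_cast; ring
            · right; exact ⟨l, hgl, hh⟩
          · rw [if_neg hcond]
            have ihx := ih (c + 1) maxl (by omega) (by omega) (by omega) hrise'
            rw [sumSeg_succ, show s + (c + 1) = s + c + 1 from by omega] at ihx
            push_cast at ihx
            exact ihx
        · rw [if_neg hr]; left; rfl
      · rw [show t.length - (s + c) = 0 from by omega]
        left; rfl

theorem A_ge_good (t : List Int) (s l : Nat) (hg : GoodSeg t s l) :
    (l : Int) ≤ longest_increasing_subsequence_with_equal_sum t := by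
  have h2 := hg.1
  have hlen := hg.2.1
  unfold longest_increasing_subsequence_with_equal_sum
  refine foldl_ge_of_mem (fun a x => innerA_ge t (t.length - (x + 1)) (x + 1) 1 (t.getD x 0) a) _ s
    (List.mem_range.mpr (by omega)) _ (fun a => ?_) 0
  have hx := innerA_reaches t s l hg (l - 1) 1 a (le_refl _) (le_refl 1) (by omega)
  rw [sumSeg_one] at hx
  simpa using hx

theorem A_shape (t : List Int) :
    longest_increasing_subsequence_with_equal_sum t = 0 ∨
      ∃ s l, GoodSeg t s l ∧ longest_increasing_subsequence_with_equal_sum t = (l : Int) := by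
  unfold longest_increasing_subsequence_with_equal_sum
  refine foldl_inv (P := fun a => a = 0 ∨ ∃ s l, GoodSeg t s l ∧ a = (l : Int)) _ ?_ 0 (Or.inl rfl)
  intro a x hx hP
  have hxl : x + 1 ≤ t.length := by have := List.mem_range.mp hx; omega
  have hres := innerA_result t x (t.length - (x + 1)) 1 a (le_refl _) (le_refl 1) hxl
    (by intro e h1 h2; omega)
  rw [sumSeg_one] at hres
  simp only [Nat.cast_one] at hres
  rcases hres with hh | ⟨l, hgl, hh⟩
  · rw [hh]; exact hP
  · right; exact ⟨x, l, hgl, hh⟩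

theorem A_nonneg (t : List Int) : 0 ≤ longest_increasing_subsequence_with_equal_sum t := by
  unfold longest_increasing_subsequence_with_equal_sum
  exact foldl_init_le (fun a x => innerA_ge t (t.length - (x + 1)) (x + 1) 1 (t.getD x 0) a) _ 0

-- ---- B-side: runEnd facts ----
theorem runEnd_ge (t : List Int) : ∀ fuel j, j ≤ runEnd t fuel j := by
  intro fuel
  induction fuel with
  | zero => intro j; exact le_refl _
  | succ f ih =>
      intro j
      simp only [runEnd]
      split
      · exact le_trans (Nat.le_succ j) (ih (j + 1))
      · exact le_refl _

theorem runEnd_le (t : List Int) : ∀ fuel j, j ≤ t.length → runEnd t fuel j ≤ t.length := by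
  intro fuel
  induction fuel with
  | zero => intro j h; exact h
  | succ f ih =>
      intro j h
      simp only [runEnd]
      split
      · rename_i hc; exact ih (j + 1) (by omega)
      · exact h

theorem runEnd_rise (t : List Int) :
    ∀ fuel j e, j ≤ e → e < runEnd t fuel j → t.getD (e - 1) 0 < t.getD e 0 := by
  intro fuel
  induction fuel with
  | zero => intro j e he1 he2; simp only [runEnd] at he2; omega
  | succ f ih =>
      intro j e he1 he2
      simp only [runEnd] at he2
      by_cases hc : j < t.length ∧ t.getD (j - 1) 0 < t.getD j 0
      · rw [if_pos hc] at he2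
        rcases Nat.eq_or_lt_of_le he1 with h | h
        · subst h; exact hc.2
        · exact ih (j + 1) e h he2
      · rw [if_neg hc] at he2; omega

theorem runEnd_stop (t : List Int) :
    ∀ fuel j, t.length - j ≤ fuel →
      ¬ (runEnd t fuel j < t.length ∧
          t.getD (runEnd t fuel j - 1) 0 < t.getD (runEnd t fuel j) 0) := by
  intro fuel
  induction fuel with
  | zero =>
      intro j h
      simp only [runEnd]
      intro hc
      omega
  | succ f ih =>
      intro j h
      simp only [runEnd]
      by_cases hc : j < t.length ∧ t.getD (j - 1) 0 < t.getD j 0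
      · rw [if_pos hc]
        exact ih (j + 1) (by omega)
      · rw [if_neg hc]
        exact hc

-- ---- B-side: inner-loop invariant ----
def InvB (t : List Int) (i m : Nat) (best0 : Int) (r : Nat)
    (st : PySem.Dict Int Int × Int × Int) : Prop :=
  st.2.1 = sumSeg t i (min r m) ∧
  (∀ v : Int, st.1.get? v =
      ((List.range r).find? (fun k => QKey t i k == v)).map (fun k => (k : Int))) ∧
  best0 ≤ st.2.2 ∧
  (∀ k1 k2 : Nat, k1 < k2 → k2 < r → QKey t i k1 = QKey t i k2 → 2 ≤ k2 - k1 →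
      ((k2 : Int) - (k1 : Int)) ≤ st.2.2) ∧
  (st.2.2 = best0 ∨ ∃ k1 k2 : Nat, k1 < k2 ∧ k2 < r ∧ QKey t i k1 = QKey t i k2 ∧
      2 ≤ k2 - k1 ∧ st.2.2 = (k2 : Int) - (k1 : Int))

theorem find?_range_spec (p : Nat → Bool) (r : Nat) :
    ((List.range r).find? p = none ∧ ∀ k, k < r → ¬ p k) ∨
      ∃ f, (List.range r).find? p = some f ∧ f < r ∧ p f ∧ ∀ k, k < f → ¬ p k := by
  induction r with
  | zero => left; simp
  | succ r ih =>
      rw [List.range_succ, List.find?_append]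
      rcases ih with ⟨hn, hall⟩ | ⟨f, hf, hfr, hpf, hmin⟩
      · rw [hn]
        by_cases hp : p r
        · right; exact ⟨r, by simp [hp], by omega, hp, hall⟩
        · left
          constructor
          · simp [hp]
          · intro k hk
            rcases Nat.lt_succ_iff_lt_or_eq.mp hk with h | h
            · exact hall k h
            · subst h; exact fun hc => hp hc
      · right; exact ⟨f, by simp [hf], by omega, hpf, hmin⟩

theorem stepB_none (t : List Int) (i m : Nat) (st : PySem.Dict Int Int × Int × Int) (k : Nat)
    (hget : st.1.get? ((k : Int) - st.2.1) = none) :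
    stepB t i m st k =
      (st.1.insert ((k : Int) - st.2.1) (k : Int),
       if k < m then st.2.1 + t.getD (i + k) 0 else st.2.1, st.2.2) := by
  simp only [stepB, hget]

theorem stepB_some (t : List Int) (i m : Nat) (st : PySem.Dict Int Int × Int × Int) (k : Nat)
    (f : Int) (hget : st.1.get? ((k : Int) - st.2.1) = some f) :
    stepB t i m st k =
      (st.1,
       if k < m then st.2.1 + t.getD (i + k) 0 else st.2.1,
       if 2 ≤ (k : Int) - f ∧ st.2.2 < (k : Int) - f then (k : Int) - f else st.2.2) := by
  simp only [stepB, hget]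

theorem innerB_inv (t : List Int) (i m : Nat) (best0 : Int) (him : i + m ≤ t.length) :
    ∀ r, r ≤ m + 1 →
      InvB t i m best0 r ((List.range r).foldl (stepB t i m) (PySem.Dict.empty, 0, best0)) := by
  intro r
  induction r with
  | zero =>
      intro _
      unfold InvB
      refine ⟨by simp [sumSeg_zero], ?_, by simp, ?_, Or.inl (by simp)⟩
      · intro v; simp [PySem.Dict.get?_empty]
      · intro k1 k2 _ h2 _ _; omega
  | succ r ih =>
      intro hr1
      obtain ⟨hp, hd, hb0, hpair, hshape⟩ := ih (by omega)
      unfold InvB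
      rw [List.range_succ, List.foldl_append, List.foldl_cons, List.foldl_nil]
      set st := (List.range r).foldl (stepB t i m) (PySem.Dict.empty, 0, best0) with hst
      have hrm : r ≤ m := by omega
      have hpr : st.2.1 = sumSeg t i r := by rw [hp]; congr 1; omega
      have hkey : (r : Int) - st.2.1 = QKey t i r := by rw [hpr]; rfl
      have hpnew : (if r < m then st.2.1 + t.getD (i + r) 0 else st.2.1)
          = sumSeg t i (min (r + 1) m) := by
        by_cases hlt : r < m
        · rw [if_pos hlt, hpr, ← sumSeg_succ]; congr 1; omega
        · rw [if_neg hlt, hpr]; congr 1; omega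
      rcases find?_range_spec (fun k => QKey t i k == QKey t i r) r with
        ⟨hn, hnone⟩ | ⟨f, hf, hfr, hpf, hmin⟩
      · have hget : st.1.get? ((r : Int) - st.2.1) = none := by rw [hkey, hd, hn]; rfl
        rw [stepB_none t i m st r hget]
        dsimp only
        refine ⟨hpnew, ?_, hb0, ?_, ?_⟩
        · intro v
          rw [hkey, PySem.Dict.get?_insert, List.find?_append]
          by_cases hv : v = QKey t i r
          · subst hv
            rw [if_pos rfl, hn]
            simp [List.find?]
          · rw [if_neg hv, hd]
            have hbf : (QKey t i r == v) = false := beq_eq_false_iff_ne.mpr (fun h => hv h.symm)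
            cases hfind : List.find? (fun k => QKey t i k == v) (List.range r) with
            | some w => simp [hfind]
            | none => simp [hfind, List.find?, hbf]
        · intro k1 k2 hk12 hk2 hq h2
          by_cases hk2r : k2 < r
          · exact hpair k1 k2 hk12 hk2r hq h2
          · have hk2e : k2 = r := by omega
            subst hk2e
            exact absurd (show (QKey t i k1 == QKey t i k2) = true by simp [hq])
              (hnone k1 (by omega))
        · rcases hshape with hh | ⟨a, b, h1, h2', h3, h4, h5⟩
          · left; exact hh
          · right; exact ⟨a, b, h1, by omega, h3, h4, h5⟩
      · have hqf : QKey t i f = QKey t i r := by simpa using hpf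
        have hget : st.1.get? ((r : Int) - st.2.1) = some (f : Int) := by rw [hkey, hd, hf]; rfl
        rw [stepB_some t i m st r (f : Int) hget]
        dsimp only
        have hfmin : ∀ k1, k1 < r → QKey t i k1 = QKey t i r → f ≤ k1 := by
          intro k1 hk1 hq
          by_contra hc
          exact hmin k1 (by omega) (by simp [hq])
        refine ⟨hpnew, ?_, ?_, ?_, ?_⟩
        · intro v
          rw [hd, List.find?_append]
          cases hfind : List.find? (fun k => QKey t i k == v) (List.range r) with
          | some w => simp [hfind]
          | none =>
              have hv : v ≠ QKey t i r := by
                intro h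
                rw [h, hf] at hfind
                cases hfind
              have hbf : (QKey t i r == v) = false := beq_eq_false_iff_ne.mpr (fun h => hv h.symm)
              simp [hfind, List.find?, hbf]
        · split
          · rename_i hcc; exact le_trans hb0 (le_of_lt hcc.2)
          · exact hb0
        · intro k1 k2 hk12 hk2 hq h2
          by_cases hk2r : k2 < r
          · have hold := hpair k1 k2 hk12 hk2r hq h2
            split
            · rename_i hcc; exact le_trans hold (le_of_lt hcc.2)
            · exact hold
          · have hk2e : k2 = r := by omega
            subst hk2e
            have hf1 : f ≤ k1 := hfmin k1 hk12 hq
            have e2 : ((k2 : Int) - (k1 : Int)) ≤ (k2 : Int) - (f : Int) :=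
              sub_le_sub_left (by exact_mod_cast hf1) _
            split
            · exact e2
            · rename_i hcc
              push_neg at hcc
              have e1 : (2 : Int) ≤ (k2 : Int) - (k1 : Int) := by
                rw [← Nat.cast_sub (le_of_lt hk12)]; exact_mod_cast h2
              exact le_trans e2 (hcc (le_trans e1 e2))
        · split
          · rename_i hcc
            right
            refine ⟨f, r, hfr, by omega, hqf, by omega, rfl⟩
          · rcases hshape with hh | ⟨a, b, h1', h2', h3', h4', h5'⟩
            · left; exact hh
            · right; exact ⟨a, b, h1', by omega, h3', h4', h5'⟩

-- key pairs inside a run give good segments, and conversely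
theorem pair_good (t : List Int) (i : Nat) (hi : i < t.length)
    (k1 k2 : Nat) (hk : k1 < k2) (hk2 : k2 ≤ runEnd t (t.length - (i + 1)) (i + 1) - i)
    (hq : QKey t i k1 = QKey t i k2) (h2 : 2 ≤ k2 - k1) :
    GoodSeg t (i + k1) (k2 - k1) := by
  have hge := runEnd_ge t (t.length - (i + 1)) (i + 1)
  have hle := runEnd_le t (t.length - (i + 1)) (i + 1) (by omega)
  have hsplit := sumSeg_split t i k1 (k2 - k1)
  rw [show k1 + (k2 - k1) = k2 from by omega] at hsplit
  refine ⟨h2, by omega, ?_, ?_⟩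
  · intro e he1 he2
    exact runEnd_rise t (t.length - (i + 1)) (i + 1) e (by omega) (by omega)
  · have hq' : (k1 : Int) - sumSeg t i k1 = (k2 : Int) - sumSeg t i k2 := hq
    omega

theorem good_pair (t : List Int) (i s l : Nat) (hi : i < t.length)
    (hg : GoodSeg t s l) (his : i ≤ s) (hsj : s < runEnd t (t.length - (i + 1)) (i + 1)) :
    s + l ≤ runEnd t (t.length - (i + 1)) (i + 1) ∧
      QKey t i (s - i) = QKey t i (s - i + l) := by
  obtain ⟨h2, hlen, hrise, hsum⟩ := hg
  have hge := runEnd_ge t (t.length - (i + 1)) (i + 1)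
  have hstop := runEnd_stop t (t.length - (i + 1)) (i + 1) (le_refl _)
  have hsl : s + l ≤ runEnd t (t.length - (i + 1)) (i + 1) := by
    by_contra hc
    push_neg at hc
    exact hstop ⟨by omega, hrise (runEnd t (t.length - (i + 1)) (i + 1)) (by omega) (by omega)⟩
  refine ⟨hsl, ?_⟩
  have hsplit := sumSeg_split t i (s - i) l
  rw [show i + (s - i) = s from by omega] at hsplit
  unfold QKey
  omega

-- ---- B-side: outer loop ----
theorem outerB_ge_init (t : List Int) :
    ∀ fuel i best, best ≤ outerB t fuel i best := by
  intro fuel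
  induction fuel with
  | zero => intro i best; exact le_refl _
  | succ f ih =>
      intro i best
      simp only [outerB]
      split
      · rename_i hi
        have hjge := runEnd_ge t (t.length - (i + 1)) (i + 1)
        have hjle := runEnd_le t (t.length - (i + 1)) (i + 1) (by omega)
        have hinv := innerB_inv t i (runEnd t (t.length - (i + 1)) (i + 1) - i) best (by omega)
          (runEnd t (t.length - (i + 1)) (i + 1) - i + 1) (le_refl _)
        exact le_trans hinv.2.2.1 (ih _ _)
      · exact le_refl _

theorem outerB_ge_good (t : List Int) (s l : Nat) (hg : GoodSeg t s l) :
    ∀ fuel i best, t.length - i ≤ fuel → i ≤ s → (l : Int) ≤ outerB t fuel i best := by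
  intro fuel
  induction fuel with
  | zero =>
      intro i best hk his
      exact absurd hg.2.1 (by have := hg.1; omega)
  | succ f ih =>
      intro i best hk his
      have hs_lt : s < t.length := by have := hg.1; have := hg.2.1; omega
      have hi : i < t.length := by omega
      simp only [outerB]
      rw [if_pos hi]
      have hjge := runEnd_ge t (t.length - (i + 1)) (i + 1)
      have hjle := runEnd_le t (t.length - (i + 1)) (i + 1) (by omega)
      by_cases hsj : s < runEnd t (t.length - (i + 1)) (i + 1)
      · obtain ⟨hsl, hq⟩ := good_pair t i s l hi hg his hsj
        have hinv := innerB_inv t i (runEnd t (t.length - (i + 1)) (i + 1) - i) best (by omega)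
          (runEnd t (t.length - (i + 1)) (i + 1) - i + 1) (le_refl _)
        have h2l : 2 ≤ l := hg.1
        have hlt1 : s - i < s - i + l := by omega
        have hlt2 : s - i + l < runEnd t (t.length - (i + 1)) (i + 1) - i + 1 := by omega
        have hge2 : 2 ≤ s - i + l - (s - i) := by omega
        have hp := hinv.2.2.2.1 (s - i) (s - i + l) hlt1 hlt2 hq hge2
        have hA : ((s - i + l : Nat) : Int) - ((s - i : Nat) : Int) = (l : Int) := by omega
        refine le_trans ?_ (outerB_ge_init t f _ _)
        rw [← hA]
        exact hp
      · push_neg at hsj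
        exact ih _ _ (by omega) (by omega)

theorem outerB_shape (t : List Int) :
    ∀ fuel i best, t.length - i ≤ fuel →
      outerB t fuel i best = best ∨
        ∃ s l, GoodSeg t s l ∧ outerB t fuel i best = (l : Int) := by
  intro fuel
  induction fuel with
  | zero => intro i best hk; left; rfl
  | succ f ih =>
      intro i best hk
      by_cases hi : i < t.length
      · simp only [outerB]
        rw [if_pos hi]
        have hjge := runEnd_ge t (t.length - (i + 1)) (i + 1)
        have hjle := runEnd_le t (t.length - (i + 1)) (i + 1) (by omega)
        have hinv := innerB_inv t i (runEnd t (t.length - (i + 1)) (i + 1) - i) best (by omega)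
          (runEnd t (t.length - (i + 1)) (i + 1) - i + 1) (le_refl _)
        set st := (List.range (runEnd t (t.length - (i + 1)) (i + 1) - i + 1)).foldl
          (stepB t i (runEnd t (t.length - (i + 1)) (i + 1) - i))
          (PySem.Dict.empty, 0, best) with hst
        rcases ih (runEnd t (t.length - (i + 1)) (i + 1)) st.2.2 (by omega) with hh | ⟨s, l, hgl, hh⟩
        · rw [hh]
          rcases hinv.2.2.2.2 with hb | ⟨k1, k2, hk12, hk2, hq, h2, hbeq⟩
          · left; exact hb
          · right
            refine ⟨i + k1, k2 - k1, pair_good t i hi k1 k2 hk12 (by omega) hq h2, ?_⟩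
            rw [hbeq]; omega
        · right; exact ⟨s, l, hgl, hh⟩
      · simp only [outerB]
        rw [if_neg hi]
        left; rfl

-- ===== VERDICT (by name: the statement is the Claim_ definition above) =====
theorem longest_increasing_subsequence_with_equal_sum_spec : Claim_equal_longest_increasing_subsequence_with_equal_sum := by
  intro t _
  unfold Spec_longest_increasing_subsequence_with_equal_sum
  unfold longest_increasing_subsequence_with_equal_sum_alt
  apply le_antisymm
  · rcases A_shape t with h | ⟨s, l, hg, h⟩
    · rw [h]; exact outerB_ge_init t t.length 0 0
    · rw [h]; exact outerB_ge_good t s l hg t.length 0 0 (by omega) (Nat.zero_le s)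
  · rcases outerB_shape t t.length 0 0 (by omega) with h | ⟨s, l, hg, h⟩
    · rw [h]; exact A_nonneg t
    · rw [h]; exact A_ge_good t s l hg
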